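-- pv_equiv track=rewrite | github.com/AsianZeus/Portfolio-Backend | utils.py | sort_skills
-- ===== SOURCE A (Python) =====
-- def sort_skills(skillz):
--     order = ['Language',
--     'Framework',
--     'Cloud Services',
--     'Database',
--     'IDE',
--     'Operating System']
--     skills = []
--     for i in range(len(order)):
--         for skill in skillz:
--             if skill['Type'] == order[i]:
--                 skills.append(skill)
--     return skills
-- ===== SOURCE B (Python) =====
-- def sort_skills(skillz):
--     order = ['Language',
--     'Framework',
--     'Cloud Services',
--     'Database',
--     'IDE',
--     'Operating System']
--     buckets = {cat: [] for cat in order}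
--     for skill in skillz:
--         t = skill['Type']
--         if t in buckets:
--             buckets[t].append(skill)
--     return [skill for cat in order for skill in buckets[cat]]
-- ===== Notes on version B (the rewrite author's own statement) =====
-- stated objective: faster
-- what changed: Single pass over skillz distributing each skill into per-category buckets (a dict built once), then concatenating buckets in the fixed category order, instead of re-scanning the whole skill list once per category.
import Mathlib
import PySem

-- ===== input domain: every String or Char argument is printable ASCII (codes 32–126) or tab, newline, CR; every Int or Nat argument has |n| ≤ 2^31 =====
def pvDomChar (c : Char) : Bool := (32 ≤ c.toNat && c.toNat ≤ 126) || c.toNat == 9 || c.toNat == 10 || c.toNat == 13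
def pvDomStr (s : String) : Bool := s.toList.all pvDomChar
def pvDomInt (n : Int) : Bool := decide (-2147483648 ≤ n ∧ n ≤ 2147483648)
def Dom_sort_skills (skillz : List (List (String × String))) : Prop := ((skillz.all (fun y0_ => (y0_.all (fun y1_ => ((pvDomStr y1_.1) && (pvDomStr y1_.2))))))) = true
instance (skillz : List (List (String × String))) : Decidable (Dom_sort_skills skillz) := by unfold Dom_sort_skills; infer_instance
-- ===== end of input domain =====

-- B replaces A's rescan-per-category nested loops by one bucketing pass plus a concatenation; return value only.

-- the fixed category order (module constant `order` in both Pythons)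
def pvOrder : List String :=
  ["Language", "Framework", "Cloud Services", "Database", "IDE", "Operating System"]

-- ===== PORT A =====
-- for i in range(len(order)): for skill in skillz: if skill['Type'] == order[i]: skills.append(skill)
def sort_skills (skillz : List (List (String × String))) : List (List (String × String)) :=
  pvOrder.foldl (fun skills cat =>
    skillz.foldl (fun skills skill =>
      if (PySem.Dict.mk skill).get? "Type" = some cat then skills ++ [skill] else skills)
      skills) []

-- ===== PORT B =====
def sort_skills_alt (skillz : List (List (String × String))) : List (List (String × String)) :=
  let buckets0 : PySem.Dict String (List (List (String × String))) :=
    pvOrder.foldl (fun d cat => d.insert cat []) PySem.Dict.empty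
  let buckets := skillz.foldl (fun b skill =>
    match (PySem.Dict.mk skill).get? "Type" with
    | some t => if b.contains t then b.modify t [] (fun l => l ++ [skill]) else b
    | none => b) buckets0
  pvOrder.flatMap (fun cat => buckets.getD cat [])

-- ===== PRECONDITION & SPEC =====
-- Pre_ excludes skills without a 'Type' key: there both Pythons raise KeyError (skill['Type']).
def Pre_sort_skills (skillz : List (List (String × String))) : Prop :=
  ∀ s ∈ skillz, "Type" ∈ s.map Prod.fst
instance (skillz : List (List (String × String))) : Decidable (Pre_sort_skills skillz) := by unfold Pre_sort_skills; infer_instance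
def pvWitness_sort_skills : (List (List (String × String))) :=
  [[("Type", "Database"), ("Name", "redis")], [("Type", "Language"), ("Name", "py")], [("Type", "misc"), ("Name", "x")]]

def Spec_sort_skills (skillz : List (List (String × String))) (out : List (List (String × String))) : Prop := out = sort_skills_alt skillz
instance (skillz : List (List (String × String))) (out : List (List (String × String))) : Decidable (Spec_sort_skills skillz out) := by unfold Spec_sort_skills; infer_instance

-- ===== CLAIM (what is proved, stated in full; the proofs are below) =====
def Claim_equal_sort_skills : Prop := ∀ (skillz : List (List (String × String))), Dom_sort_skills skillz → Pre_sort_skills skillz → Spec_sort_skills skillz (sort_skills skillz)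

-- ===== LEMMAS AND PROOFS =====

-- the per-category selection both programs compute
def pvSel (skillz : List (List (String × String))) (cat : String) : List (List (String × String)) :=
  skillz.filter (fun s => decide ((PySem.Dict.mk s).get? "Type" = some cat))

theorem sort_skills_eq_flatMap (skillz : List (List (String × String))) :
    sort_skills skillz = pvOrder.flatMap (pvSel skillz) := by
  unfold sort_skills
  have h : ∀ (acc : List (List (String × String))) (cat : String),
      skillz.foldl (fun skills skill =>
        if (PySem.Dict.mk skill).get? "Type" = some cat then skills ++ [skill] else skills) acc
      = acc ++ pvSel skillz cat := by
    intro acc cat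
    exact PySem.List.foldl_append_ite_eq_filter _ skillz acc
  simp only [pvOrder, List.foldl_cons, List.foldl_nil, List.flatMap_cons, List.flatMap_nil,
    List.append_nil, h]
  simp [List.append_assoc]

-- bucket invariant: the fold fills each already-present category with exactly its filter
theorem bucket_getD (l : List (List (String × String)))
    (b : PySem.Dict String (List (List (String × String)))) (cat : String)
    (hc : b.contains cat = true) :
    (l.foldl (fun b skill =>
        match (PySem.Dict.mk skill).get? "Type" with
        | some t => if b.contains t then b.modify t [] (fun l => l ++ [skill]) else b
        | none => b) b).getD cat []
      = b.getD cat [] ++ pvSel l cat := by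
  induction l generalizing b with
  | nil => simp [pvSel]
  | cons s l ih =>
    simp only [List.foldl_cons]
    cases h : (PySem.Dict.mk s).get? "Type" with
    | none =>
      rw [ih b hc]
      simp [pvSel, h]
    | some t =>
      simp only
      by_cases ht : b.contains t = true
      · rw [if_pos ht]
        have hc' : (b.modify t [] (fun l => l ++ [s])).contains cat = true := by
          rw [PySem.Dict.contains_modify]; simp [hc]
        rw [ih _ hc']
        by_cases hct : cat = t
        · subst hct
          rw [PySem.Dict.getD_modify_self]
          simp [pvSel, h]
        · rw [PySem.Dict.getD_modify_of_ne b [] (fun l => l ++ [s]) hct]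
          simp [pvSel, List.filter_cons, h]
          exact fun e => hct e.symm
      · rw [if_neg ht]
        rw [ih b hc]
        have htc : t ≠ cat := by intro e; subst e; exact ht hc
        simp [pvSel, List.filter_cons, h]
        exact htc

theorem alt_eq_flatMap (skillz : List (List (String × String))) :
    sort_skills_alt skillz = pvOrder.flatMap (pvSel skillz) := by
  unfold sort_skills_alt
  have hb0 : ∀ c ∈ pvOrder,
      ((pvOrder.foldl (fun d cat => d.insert cat ([] : List (List (String × String))))
        PySem.Dict.empty).getD c []) = [] := by decide
  have hc0 : ∀ c ∈ pvOrder,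
      ((pvOrder.foldl (fun d cat => d.insert cat ([] : List (List (String × String))))
        PySem.Dict.empty).contains c) = true := by decide
  apply List.flatMap_congr
  intro cat hmem
  rw [bucket_getD skillz _ cat (hc0 cat hmem), hb0 cat hmem]
  simp

-- ===== VERDICT (by name: the statement is the Claim_ definition above) =====
theorem sort_skills_spec : Claim_equal_sort_skills := by
  intro skillz _ _
  unfold Spec_sort_skills
  rw [sort_skills_eq_flatMap, alt_eq_flatMap]
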